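-- pv_equiv track=rewrite | github.com/Puriney/MrY | MrY/list_file.py | tag_installed
-- ===== SOURCE A (Python) =====
-- from collections import defaultdict, OrderedDict
--
-- def tag_installed(filelist):
--     tag = OrderedDict({'Genome(.fa)': False, 'Genome(.fa.gz)': False,
--                        'GTF(.gtf.gz)': False, 'GFF3(.gff3.gz)': False,
--                        'Bowtie2': False, 'STAR': False})
--     for f in filelist:
--         if f.endswith('.fa'):
--             tag['Genome(.fa)'] = True
--         elif f.endswith('.fa.gz'):
--             tag['Genome(.fa.gz)'] = True
--         elif f.endswith('.gtf.gz'):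
--             tag['GTF(.gtf.gz)'] = True
--         elif f.endswith('.gff3.gz'):
--             tag['GFF3(.gff3.gz)'] = True
--         elif f.endswith('.bt2'):
--             tag['Bowtie2'] = True
--         elif f.endswith('.star'):  # to-do
--             tag['STAR'] = True
--         else:
--             continue
--     return(tag)
-- ===== SOURCE B (Python) =====
-- from collections import OrderedDict
--
-- def tag_installed(filelist):
--     pairs = [('Genome(.fa)', '.fa'), ('Genome(.fa.gz)', '.fa.gz'),
--              ('GTF(.gtf.gz)', '.gtf.gz'), ('GFF3(.gff3.gz)', '.gff3.gz'),
--              ('Bowtie2', '.bt2'), ('STAR', '.star')]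
--     return OrderedDict((k, any(f.endswith(sfx) for f in filelist))
--                        for k, sfx in pairs)
-- ===== Notes on version B (the rewrite author's own statement) =====
-- stated objective: idiomatic
-- what changed: Inverts the loop nesting: instead of one pass over files with a six-way if/elif chain mutating an OrderedDict, B iterates over a fixed (key, suffix) table and computes any(f.endswith(suffix)) over the file list per category; suffixes are mutually exclusive, so results match exactly.
import Mathlib
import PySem

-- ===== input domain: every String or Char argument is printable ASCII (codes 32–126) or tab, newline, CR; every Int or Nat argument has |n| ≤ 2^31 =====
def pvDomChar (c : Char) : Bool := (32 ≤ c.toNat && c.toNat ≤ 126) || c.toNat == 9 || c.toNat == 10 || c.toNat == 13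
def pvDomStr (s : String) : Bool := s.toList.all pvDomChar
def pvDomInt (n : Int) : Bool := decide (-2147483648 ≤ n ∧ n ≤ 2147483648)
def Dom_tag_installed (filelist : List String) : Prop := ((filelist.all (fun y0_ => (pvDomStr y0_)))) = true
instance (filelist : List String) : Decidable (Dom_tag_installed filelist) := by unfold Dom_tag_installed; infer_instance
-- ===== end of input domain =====

-- B replaces A's single file pass with a six-way if/elif chain by a per-category scan
-- over a fixed (key, suffix) table — more idiomatic, same cost.


-- ===== PORT A =====
-- one step of A's loop body: the if/elif chain mutating the dict
def tagStep (d : PySem.Dict String Bool) (f : String) : PySem.Dict String Bool :=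
  if PySem.Str.endswith f ".fa" then d.insert "Genome(.fa)" true
  else if PySem.Str.endswith f ".fa.gz" then d.insert "Genome(.fa.gz)" true
  else if PySem.Str.endswith f ".gtf.gz" then d.insert "GTF(.gtf.gz)" true
  else if PySem.Str.endswith f ".gff3.gz" then d.insert "GFF3(.gff3.gz)" true
  else if PySem.Str.endswith f ".bt2" then d.insert "Bowtie2" true
  else if PySem.Str.endswith f ".star" then d.insert "STAR" true
  else d

def tag_installed (filelist : List String) : List (String × Bool) :=
  (filelist.foldl tagStep
    (PySem.Dict.ofList [("Genome(.fa)", false), ("Genome(.fa.gz)", false),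
                        ("GTF(.gtf.gz)", false), ("GFF3(.gff3.gz)", false),
                        ("Bowtie2", false), ("STAR", false)])).items

-- ===== PORT B =====
def tagPairs : List (String × String) :=
  [("Genome(.fa)", ".fa"), ("Genome(.fa.gz)", ".fa.gz"),
   ("GTF(.gtf.gz)", ".gtf.gz"), ("GFF3(.gff3.gz)", ".gff3.gz"),
   ("Bowtie2", ".bt2"), ("STAR", ".star")]

def tag_installed_alt (filelist : List String) : List (String × Bool) :=
  tagPairs.map (fun p => (p.1, filelist.any (fun f => PySem.Str.endswith f p.2)))

-- ===== PRECONDITION & SPEC =====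
def Spec_tag_installed (filelist : List String) (out : List (String × Bool)) : Prop := out = tag_installed_alt filelist
instance (filelist : List String) (out : List (String × Bool)) : Decidable (Spec_tag_installed filelist out) := by unfold Spec_tag_installed; infer_instance

-- ===== CLAIM (what is proved, stated in full; the proofs are below) =====
def Claim_equal_tag_installed : Prop := ∀ (filelist : List String), Dom_tag_installed filelist → Spec_tag_installed filelist (tag_installed filelist)

-- ===== LEMMAS AND PROOFS =====

-- a string cannot end with two suffixes neither of which is a suffix of the other
theorem endswith_excl (f s1 s2 : String)
    (h12 : ¬ (s1.toList <:+ s2.toList)) (h21 : ¬ (s2.toList <:+ s1.toList))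
    (h : PySem.Str.endswith f s1 = true) : PySem.Str.endswith f s2 = false := by
  by_contra hc
  rw [Bool.not_eq_false] at hc
  simp at h hc
  have h1 := (PySem.Chars.endswith_iff f.toList s1.toList).mp h
  have h2 := (PySem.Chars.endswith_iff f.toList s2.toList).mp hc
  rcases List.suffix_or_suffix_of_suffix h1 h2 with h' | h'
  · exact h12 h'
  · exact h21 h'

-- the loop invariant: from any dict state with the six fixed keys, the loop ORs
-- into each slot whether some file matches that slot's suffix
theorem tag_loop (fs : List String) (b1 b2 b3 b4 b5 b6 : Bool) :
    (fs.foldl tagStep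
      (PySem.Dict.mk [("Genome(.fa)", b1), ("Genome(.fa.gz)", b2),
                      ("GTF(.gtf.gz)", b3), ("GFF3(.gff3.gz)", b4),
                      ("Bowtie2", b5), ("STAR", b6)])).items =
    [("Genome(.fa)",    b1 || fs.any (fun f => PySem.Str.endswith f ".fa")),
     ("Genome(.fa.gz)", b2 || fs.any (fun f => PySem.Str.endswith f ".fa.gz")),
     ("GTF(.gtf.gz)",   b3 || fs.any (fun f => PySem.Str.endswith f ".gtf.gz")),
     ("GFF3(.gff3.gz)", b4 || fs.any (fun f => PySem.Str.endswith f ".gff3.gz")),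
     ("Bowtie2",        b5 || fs.any (fun f => PySem.Str.endswith f ".bt2")),
     ("STAR",           b6 || fs.any (fun f => PySem.Str.endswith f ".star"))] := by
  induction fs generalizing b1 b2 b3 b4 b5 b6 with
  | nil => simp
  | cons f rest ih =>
    simp only [List.foldl_cons, List.any_cons]
    by_cases e1 : PySem.Str.endswith f ".fa" = true
    ·
      have x2 := endswith_excl f ".fa" ".fa.gz" (by decide) (by decide) e1
      have x3 := endswith_excl f ".fa" ".gtf.gz" (by decide) (by decide) e1
      have x4 := endswith_excl f ".fa" ".gff3.gz" (by decide) (by decide) e1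
      have x5 := endswith_excl f ".fa" ".bt2" (by decide) (by decide) e1
      have x6 := endswith_excl f ".fa" ".star" (by decide) (by decide) e1
      have hstep : tagStep (PySem.Dict.mk [("Genome(.fa)", b1), ("Genome(.fa.gz)", b2), ("GTF(.gtf.gz)", b3), ("GFF3(.gff3.gz)", b4), ("Bowtie2", b5), ("STAR", b6)]) f = PySem.Dict.mk [("Genome(.fa)", true), ("Genome(.fa.gz)", b2), ("GTF(.gtf.gz)", b3), ("GFF3(.gff3.gz)", b4), ("Bowtie2", b5), ("STAR", b6)] := by
        simp only [tagStep]; rw [if_pos e1]; rfl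
      rw [hstep, ih]
      simp at e1 x2 x3 x4 x5 x6
      simp [e1, x2, x3, x4, x5, x6]
    ·
      by_cases e2 : PySem.Str.endswith f ".fa.gz" = true
      ·
        have x3 := endswith_excl f ".fa.gz" ".gtf.gz" (by decide) (by decide) e2
        have x4 := endswith_excl f ".fa.gz" ".gff3.gz" (by decide) (by decide) e2
        have x5 := endswith_excl f ".fa.gz" ".bt2" (by decide) (by decide) e2
        have x6 := endswith_excl f ".fa.gz" ".star" (by decide) (by decide) e2
        have hstep : tagStep (PySem.Dict.mk [("Genome(.fa)", b1), ("Genome(.fa.gz)", b2), ("GTF(.gtf.gz)", b3), ("GFF3(.gff3.gz)", b4), ("Bowtie2", b5), ("STAR", b6)]) f = PySem.Dict.mk [("Genome(.fa)", b1), ("Genome(.fa.gz)", true), ("GTF(.gtf.gz)", b3), ("GFF3(.gff3.gz)", b4), ("Bowtie2", b5), ("STAR", b6)] := by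
          simp only [tagStep]; rw [if_neg e1, if_pos e2]; rfl
        rw [hstep, ih]
        simp at e1 e2 x3 x4 x5 x6
        simp [e1, e2, x3, x4, x5, x6]
      ·
        by_cases e3 : PySem.Str.endswith f ".gtf.gz" = true
        ·
          have x4 := endswith_excl f ".gtf.gz" ".gff3.gz" (by decide) (by decide) e3
          have x5 := endswith_excl f ".gtf.gz" ".bt2" (by decide) (by decide) e3
          have x6 := endswith_excl f ".gtf.gz" ".star" (by decide) (by decide) e3
          have hstep : tagStep (PySem.Dict.mk [("Genome(.fa)", b1), ("Genome(.fa.gz)", b2), ("GTF(.gtf.gz)", b3), ("GFF3(.gff3.gz)", b4), ("Bowtie2", b5), ("STAR", b6)]) f = PySem.Dict.mk [("Genome(.fa)", b1), ("Genome(.fa.gz)", b2), ("GTF(.gtf.gz)", true), ("GFF3(.gff3.gz)", b4), ("Bowtie2", b5), ("STAR", b6)] := by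
            simp only [tagStep]; rw [if_neg e1, if_neg e2, if_pos e3]; rfl
          rw [hstep, ih]
          simp at e1 e2 e3 x4 x5 x6
          simp [e1, e2, e3, x4, x5, x6]
        ·
          by_cases e4 : PySem.Str.endswith f ".gff3.gz" = true
          ·
            have x5 := endswith_excl f ".gff3.gz" ".bt2" (by decide) (by decide) e4
            have x6 := endswith_excl f ".gff3.gz" ".star" (by decide) (by decide) e4
            have hstep : tagStep (PySem.Dict.mk [("Genome(.fa)", b1), ("Genome(.fa.gz)", b2), ("GTF(.gtf.gz)", b3), ("GFF3(.gff3.gz)", b4), ("Bowtie2", b5), ("STAR", b6)]) f = PySem.Dict.mk [("Genome(.fa)", b1), ("Genome(.fa.gz)", b2), ("GTF(.gtf.gz)", b3), ("GFF3(.gff3.gz)", true), ("Bowtie2", b5), ("STAR", b6)] := by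
              simp only [tagStep]; rw [if_neg e1, if_neg e2, if_neg e3, if_pos e4]; rfl
            rw [hstep, ih]
            simp at e1 e2 e3 e4 x5 x6
            simp [e1, e2, e3, e4, x5, x6]
          ·
            by_cases e5 : PySem.Str.endswith f ".bt2" = true
            ·
              have x6 := endswith_excl f ".bt2" ".star" (by decide) (by decide) e5
              have hstep : tagStep (PySem.Dict.mk [("Genome(.fa)", b1), ("Genome(.fa.gz)", b2), ("GTF(.gtf.gz)", b3), ("GFF3(.gff3.gz)", b4), ("Bowtie2", b5), ("STAR", b6)]) f = PySem.Dict.mk [("Genome(.fa)", b1), ("Genome(.fa.gz)", b2), ("GTF(.gtf.gz)", b3), ("GFF3(.gff3.gz)", b4), ("Bowtie2", true), ("STAR", b6)] := by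
                simp only [tagStep]; rw [if_neg e1, if_neg e2, if_neg e3, if_neg e4, if_pos e5]; rfl
              rw [hstep, ih]
              simp at e1 e2 e3 e4 e5 x6
              simp [e1, e2, e3, e4, e5, x6]
            ·
              by_cases e6 : PySem.Str.endswith f ".star" = true
              ·
                have hstep : tagStep (PySem.Dict.mk [("Genome(.fa)", b1), ("Genome(.fa.gz)", b2), ("GTF(.gtf.gz)", b3), ("GFF3(.gff3.gz)", b4), ("Bowtie2", b5), ("STAR", b6)]) f = PySem.Dict.mk [("Genome(.fa)", b1), ("Genome(.fa.gz)", b2), ("GTF(.gtf.gz)", b3), ("GFF3(.gff3.gz)", b4), ("Bowtie2", b5), ("STAR", true)] := by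
                  simp only [tagStep]; rw [if_neg e1, if_neg e2, if_neg e3, if_neg e4, if_neg e5, if_pos e6]; rfl
                rw [hstep, ih]
                simp at e1 e2 e3 e4 e5 e6
                simp [e1, e2, e3, e4, e5, e6]
              ·
                have hstep : tagStep (PySem.Dict.mk [("Genome(.fa)", b1), ("Genome(.fa.gz)", b2), ("GTF(.gtf.gz)", b3), ("GFF3(.gff3.gz)", b4), ("Bowtie2", b5), ("STAR", b6)]) f = PySem.Dict.mk [("Genome(.fa)", b1), ("Genome(.fa.gz)", b2), ("GTF(.gtf.gz)", b3), ("GFF3(.gff3.gz)", b4), ("Bowtie2", b5), ("STAR", b6)] := by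
                  simp only [tagStep]; rw [if_neg e1, if_neg e2, if_neg e3, if_neg e4, if_neg e5, if_neg e6]
                rw [hstep, ih]
                simp at e1 e2 e3 e4 e5 e6
                simp [e1, e2, e3, e4, e5, e6]

-- ===== VERDICT (by name: the statement is the Claim_ definition above) =====
theorem tag_installed_spec : Claim_equal_tag_installed := by
  intro filelist _
  unfold Spec_tag_installed tag_installed tag_installed_alt tagPairs
  rw [show PySem.Dict.ofList [("Genome(.fa)", false), ("Genome(.fa.gz)", false),
        ("GTF(.gtf.gz)", false), ("GFF3(.gff3.gz)", false),
        ("Bowtie2", false), ("STAR", false)] =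
      PySem.Dict.mk [("Genome(.fa)", false), ("Genome(.fa.gz)", false),
        ("GTF(.gtf.gz)", false), ("GFF3(.gff3.gz)", false),
        ("Bowtie2", false), ("STAR", false)] from rfl,
      tag_loop]
  simp
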